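-- pv_equiv track=rewrite | github.com/CaprisUwU/xsema | utils/bitwise.py | get_bit_ranges
-- ===== SOURCE A (Python) =====
-- from typing import Dict, List, Tuple, Any
--
-- def get_bit_ranges(n: int) -> List[Tuple[int, int]]:
--     """
--     Get ranges of consecutive set bits in the binary representation.
--
--     Returns:
--         List of (start, end) tuples for each range of consecutive 1s
--     """
--     b = bin(n)[2:]
--     ranges = []
--     start = None
--
--     for i, bit in enumerate(b):
--         if bit == '1' and start is None:
--             start = i
--         elif bit == '0' and start is not None:
--             ranges.append((start, i-1))
--             start = None
--
--     if start is not None: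
--         ranges.append((start, len(b)-1))
--
--     return ranges
-- ===== SOURCE B (Python) =====
-- def _is_start(b, i):
--     return b[i] == '1' and (i == 0 or b[i - 1] != '1')
--
--
-- def _is_end(b, i):
--     return b[i] == '1' and (i == len(b) - 1 or b[i + 1] != '1')
--
--
-- def get_bit_ranges(n: int):
--     """Boundary detection: find all run starts and all run ends independently, then pair them.
--
--     Each maximal run of 1s has exactly one left boundary and one right boundary; both
--     index lists are ascending and interleaved start<=end<start<=end..., so zipping them
--     recovers the runs. No sequential state is carried between positions.
--     """
--     b = bin(n)[2:]
--     starts = [i for i in range(len(b)) if _is_start(b, i)]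
--     ends = [i for i in range(len(b)) if _is_end(b, i)]
--     return list(zip(starts, ends))
-- ===== Notes on version B (the rewrite author's own statement) =====
-- stated objective: alternative
-- what changed: Replaces A's sequential start/None state machine (with its post-loop flush) by stateless boundary detection: two independent filter passes collect the indices where a run of 1s begins (bit set, left neighbour not set) and where it ends (bit set, right neighbour not set), and zipping the two ascending index lists yields the runs.
import Mathlib
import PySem

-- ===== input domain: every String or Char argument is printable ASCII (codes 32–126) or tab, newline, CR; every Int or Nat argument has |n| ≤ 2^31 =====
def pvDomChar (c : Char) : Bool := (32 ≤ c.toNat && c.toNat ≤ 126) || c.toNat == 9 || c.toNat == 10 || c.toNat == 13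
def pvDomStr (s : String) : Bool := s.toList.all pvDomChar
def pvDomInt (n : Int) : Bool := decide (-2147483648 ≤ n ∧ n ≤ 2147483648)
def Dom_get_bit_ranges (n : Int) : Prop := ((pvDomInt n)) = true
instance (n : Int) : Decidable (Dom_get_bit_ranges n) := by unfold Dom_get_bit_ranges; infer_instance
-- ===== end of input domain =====

-- B replaces A's sequential start/None state machine by stateless boundary detection:
-- two independent filters collect run-start and run-end indices, zipped into ranges.
-- Objective: alternative (same O(b) cost, different algorithm).

-- shared helper: the exact character list of Python's bin(n)
def pvNatBits : Nat → List Char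
  | 0 => []
  | m+1 => pvNatBits ((m+1)/2) ++ [if (m+1) % 2 = 1 then '1' else '0']
decreasing_by exact Nat.div_lt_self (Nat.succ_pos m) (by norm_num)

def pvPyBin (n : Int) : List Char :=
  (if n < 0 then ['-'] else []) ++ ['0','b'] ++ (if n = 0 then ['0'] else pvNatBits n.natAbs)

-- ===== PORT A =====
-- loop body of A: state = (ranges, start)
def pvStepA (st : List (Int × Int) × Option Int) (p : Int × Char) : List (Int × Int) × Option Int :=
  if p.2 = '1' ∧ st.2 = none then (st.1, some p.1)
  else if p.2 = '0' ∧ st.2 ≠ none then (st.1 ++ [(st.2.getD 0, p.1 - 1)], none)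
  else st

-- A's final 'if start is not None: ranges.append((start, len(b)-1))'
def pvFinishA (j : Int) (st : List (Int × Int) × Option Int) : List (Int × Int) :=
  match st.2 with
  | some s => st.1 ++ [(s, j - 1)]
  | none => st.1

def get_bit_ranges (n : Int) : List (Int × Int) :=
  let b := (pvPyBin n).drop 2
  pvFinishA (b.length : Int) ((PySem.List.enumerate b 0).foldl pvStepA ([], none))

-- ===== PORT B =====
-- helper _is_start(b, i): b[i] == '1' and (i == 0 or b[i-1] != '1')
def pvIsStart (b : List Char) (i : Int) : Bool :=
  PySem.List.pyGetD b i ' ' == '1' && (i == 0 || !(PySem.List.pyGetD b (i - 1) ' ' == '1'))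

-- helper _is_end(b, i): b[i] == '1' and (i == len(b)-1 or b[i+1] != '1')
def pvIsEnd (b : List Char) (i : Int) : Bool :=
  PySem.List.pyGetD b i ' ' == '1' && (i == (b.length : Int) - 1 || !(PySem.List.pyGetD b (i + 1) ' ' == '1'))

def get_bit_ranges_alt (n : Int) : List (Int × Int) :=
  let b := (pvPyBin n).drop 2
  let starts := (PySem.List.pyRange 0 (b.length : Int) 1).filter (pvIsStart b)
  let ends := (PySem.List.pyRange 0 (b.length : Int) 1).filter (pvIsEnd b)
  starts.zip ends

-- ===== PRECONDITION & SPEC =====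
def Spec_get_bit_ranges (n : Int) (out : List (Int × Int)) : Prop := out = get_bit_ranges_alt n
instance (n : Int) (out : List (Int × Int)) : Decidable (Spec_get_bit_ranges n out) := by unfold Spec_get_bit_ranges; infer_instance

-- ===== CLAIM (what is proved, stated in full; the proofs are below) =====
def Claim_equal_get_bit_ranges : Prop := ∀ (n : Int), Dom_get_bit_ranges n → Spec_get_bit_ranges n (get_bit_ranges n)

-- ===== LEMMAS AND PROOFS =====

-- reference spec: maximal runs of '1' of the suffix l starting at absolute index i,
-- with optional pending run start s
def pvRuns : List Char → Option Int → Int → List (Int × Int)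
  | [], none, _ => []
  | [], some s, i => [(s, i - 1)]
  | c :: t, none, i => if c = '1' then pvRuns t (some i) (i + 1) else pvRuns t none (i + 1)
  | c :: t, some s, i => if c = '1' then pvRuns t (some s) (i + 1) else (s, i - 1) :: pvRuns t none (i + 1)

lemma pvA_runs (l : List Char) : ∀ (i : Int) (st : Option Int) (r : List (Int × Int)),
    (∀ c ∈ l, c = '0' ∨ c = '1') →
    pvFinishA (i + l.length) ((PySem.List.enumerate l i).foldl pvStepA (r, st))
      = r ++ pvRuns l st i := by
  induction l with
  | nil =>
    intro i st r _
    cases st with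
    | none => simp [PySem.List.enumerate_nil, pvFinishA, pvRuns]
    | some s => simp [PySem.List.enumerate_nil, pvFinishA, pvRuns]
  | cons c t ih =>
    intro i st r hl
    rw [PySem.List.enumerate_cons]
    simp only [List.foldl_cons]
    have hlen : (i + ((c :: t).length : Int)) = (i + 1) + (t.length : Int) := by
      push_cast [List.length_cons]; ring
    rw [hlen]
    have hlt := fun d hd => hl d (List.mem_cons_of_mem _ hd)
    rcases hl c (List.mem_cons_self ..) with hc | hc <;> subst hc
    · cases st with
      | none =>
        rw [show pvStepA (r, none) (i, '0') = (r, none) from by simp [pvStepA]]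
        rw [show pvRuns ('0' :: t) none i = pvRuns t none (i + 1) from by simp [pvRuns]]
        exact ih (i + 1) none r hlt
      | some s =>
        rw [show pvStepA (r, some s) (i, '0') = (r ++ [(s, i - 1)], none) from by simp [pvStepA]]
        rw [show pvRuns ('0' :: t) (some s) i = (s, i - 1) :: pvRuns t none (i + 1) from by simp [pvRuns]]
        rw [ih (i + 1) none (r ++ [(s, i - 1)]) hlt]
        simp
    · cases st with
      | none =>
        rw [show pvStepA (r, none) (i, '1') = (r, some i) from by simp [pvStepA]]
        rw [show pvRuns ('1' :: t) none i = pvRuns t (some i) (i + 1) from by simp [pvRuns]]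
        exact ih (i + 1) (some i) r hlt
      | some s =>
        rw [show pvStepA (r, some s) (i, '1') = (r, some s) from by simp [pvStepA]]
        rw [show pvRuns ('1' :: t) (some s) i = pvRuns t (some s) (i + 1) from by simp [pvRuns]]
        exact ih (i + 1) (some s) r hlt

lemma pvNatBits_chars (m : Nat) : ∀ c ∈ pvNatBits m, c = '0' ∨ c = '1' := by
  induction m using pvNatBits.induct with
  | case1 => simp [pvNatBits]
  | case2 m ih =>
    intro c hc
    rw [pvNatBits] at hc
    rcases List.mem_append.1 hc with h | h
    · exact ih c h
    · simp at h; subst h; split <;> simp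

-- evaluating B's boundary predicates at a Nat index
lemma pvIsStart_natCast (b : List Char) (j : Nat) :
    pvIsStart b (j : Int)
      = (b[j]?.getD ' ' == '1' && (decide (j = 0) || !(b[j - 1]?.getD ' ' == '1'))) := by
  unfold pvIsStart
  rcases Nat.eq_zero_or_pos j with h | h
  · subst h; simp [PySem.List.pyGetD_zero, List.getD]
  · rw [show (j : Int) - 1 = ((j - 1 : Nat) : Int) from by omega]
    simp only [PySem.List.pyGetD_natCast,
      show ((j : Int) == 0) = false from by simpa using (show ¬ ((j : Int) = 0) from by omega),
      show decide (j = 0) = false from by simp [Nat.pos_iff_ne_zero.mp h], Bool.false_or]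
    simp [List.getD]

lemma pvIsEnd_natCast (b : List Char) (j : Nat) :
    pvIsEnd b (j : Int)
      = (b[j]?.getD ' ' == '1' && (decide (j + 1 = b.length) || !(b[j + 1]?.getD ' ' == '1'))) := by
  unfold pvIsEnd
  rw [show (j : Int) + 1 = ((j + 1 : Nat) : Int) from by omega]
  simp only [PySem.List.pyGetD_natCast,
    show ((j : Int) == (b.length : Int) - 1) = decide (j + 1 = b.length) from by
      by_cases h : j + 1 = b.length <;> simp [h] <;> omega]
  simp [List.getD]

-- B side: the zipped filtered index lists from position j equal pvRuns of the suffix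
lemma pvB_runs (b : List Char) (l : List Char) : ∀ (j : Nat), b.drop j = l →
    ((j = 0 ∨ b[j - 1]?.getD ' ' ≠ '1') →
      (((PySem.List.pyRange (j : Int) (b.length : Int) 1).filter (pvIsStart b)).zip
        ((PySem.List.pyRange (j : Int) (b.length : Int) 1).filter (pvIsEnd b))) = pvRuns l none (j : Int))
    ∧ (∀ s : Int, 1 ≤ j → b[j - 1]?.getD ' ' = '1' →
      ((s :: (PySem.List.pyRange (j : Int) (b.length : Int) 1).filter (pvIsStart b)).zip
        ((PySem.List.pyRange ((j : Int) - 1) (b.length : Int) 1).filter (pvIsEnd b))) = pvRuns l (some s) (j : Int)) := by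
  induction l with
  | nil =>
    intro j hdrop
    have hLj : b.length ≤ j := List.drop_eq_nil_iff.mp hdrop
    have hnil : PySem.List.pyRange (j : Int) (b.length : Int) 1 = [] :=
      PySem.List.pyRange_one_eq_nil (by omega)
    constructor
    · intro _
      rw [hnil]
      simp [pvRuns]
    · intro s hj hprev
      have hj1 : j - 1 < b.length := by
        by_contra h
        rw [List.getElem?_eq_none (by omega)] at hprev
        simp at hprev
      rw [hnil, show (j : Int) - 1 = ((j - 1 : Nat) : Int) from by omega,
        PySem.List.pyRange_one_cons (by omega),
        show ((j - 1 : Nat) : Int) + 1 = (j : Int) from by omega,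
        PySem.List.pyRange_one_eq_nil (by omega),
        List.filter_cons, List.filter_nil]
      rw [show pvIsEnd b ((j - 1 : Nat) : Int) = true from by
        rw [pvIsEnd_natCast]
        simp [hprev, show j - 1 + 1 = b.length from by omega]]
      simp [pvRuns]
      omega
  | cons c t ih =>
    intro j hdrop
    have hj : j < b.length := by
      by_contra h
      rw [List.drop_eq_nil_iff.mpr (by omega)] at hdrop
      exact List.cons_ne_nil _ _ hdrop.symm
    have hbj : b[j]?.getD ' ' = c := by
      have h0 : b[j]? = some c := by
        have h1 : (b.drop j)[0]? = b[j + 0]? := List.getElem?_drop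
        rw [hdrop] at h1
        simpa using h1.symm
      simp [h0]
    have hdt : b.drop (j + 1) = t := by
      have h0 : (b.drop j).tail = t := by rw [hdrop]; rfl
      rwa [List.tail_drop] at h0
    obtain ⟨ihN, ihS⟩ := ih (j + 1) hdt
    rw [show ((j + 1 : Nat) : Int) = (j : Int) + 1 from by omega] at ihN ihS
    simp only [Nat.add_sub_cancel] at ihN ihS
    constructor
    · -- no pending run at j
      intro hp
      rw [PySem.List.pyRange_one_cons (show (j : Int) < (b.length : Int) from by omega),
        List.filter_cons, List.filter_cons]
      by_cases hc : c = '1'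
      · subst hc
        rw [show pvIsStart b (j : Int) = true from by
          rw [pvIsStart_natCast]
          rcases hp with h | h
          · subst h; simp [hbj]
          · simp [hbj, h]]
        have key := ihS (j : Int) (by omega) (by simpa using hbj)
        rw [show (j : Int) + 1 - 1 = (j : Int) from by ring] at key
        rw [PySem.List.pyRange_one_cons (show (j : Int) < (b.length : Int) from by omega),
          List.filter_cons] at key
        rw [show pvRuns ('1' :: t) none (j : Int) = pvRuns t (some (j : Int)) ((j : Int) + 1) from by
          simp [pvRuns]]
        simpa using key
      · rw [show pvIsStart b (j : Int) = false from by rw [pvIsStart_natCast]; simp [hbj, hc],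
          show pvIsEnd b (j : Int) = false from by rw [pvIsEnd_natCast]; simp [hbj, hc]]
        rw [show pvRuns (c :: t) none (j : Int) = pvRuns t none ((j : Int) + 1) from by
          simp [pvRuns, hc]]
        have key := ihN (Or.inr (by simp [hbj, hc]))
        simpa using key
    · -- pending run started at s, previous char b[j-1] = '1'
      intro s hj1 hprev
      rw [show (j : Int) - 1 = ((j - 1 : Nat) : Int) from by omega,
        PySem.List.pyRange_one_cons (show ((j - 1 : Nat) : Int) < (b.length : Int) from by omega),
        show ((j - 1 : Nat) : Int) + 1 = (j : Int) from by omega,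
        List.filter_cons]
      rw [PySem.List.pyRange_one_cons (show (j : Int) < (b.length : Int) from by omega),
        List.filter_cons, List.filter_cons]
      have hEprev : pvIsEnd b ((j - 1 : Nat) : Int) = !(c == '1') := by
        rw [pvIsEnd_natCast]
        simp [show j - 1 + 1 = j from by omega, hprev, hbj,
          show ¬ (j = b.length) from by omega]
      by_cases hc : c = '1'
      · subst hc
        rw [hEprev]
        rw [show pvIsStart b (j : Int) = false from by
          rw [pvIsStart_natCast]; simp [hprev, show ¬ (j = 0) from by omega]]
        have key := ihS s (by omega) (by simpa using hbj)
        rw [show (j : Int) + 1 - 1 = (j : Int) from by ring] at key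
        rw [PySem.List.pyRange_one_cons (show (j : Int) < (b.length : Int) from by omega),
          List.filter_cons] at key
        rw [show pvRuns ('1' :: t) (some s) (j : Int) = pvRuns t (some s) ((j : Int) + 1) from by
          simp [pvRuns]]
        simpa using key
      · rw [hEprev]
        rw [show pvIsStart b (j : Int) = false from by rw [pvIsStart_natCast]; simp [hbj, hc],
          show pvIsEnd b (j : Int) = false from by rw [pvIsEnd_natCast]; simp [hbj, hc]]
        rw [show pvRuns (c :: t) (some s) (j : Int)
            = (s, (j : Int) - 1) :: pvRuns t none ((j : Int) + 1) from by
          simp [pvRuns, hc]]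
        have key := ihN (Or.inr (by simp [hbj, hc]))
        have hcast2 : ((j - 1 : Nat) : Int) = (j : Int) - 1 := by omega
        simp [hc, hcast2, key]

-- ===== VERDICT (by name: the statement is the Claim_ definition above) =====
theorem get_bit_ranges_spec : Claim_equal_get_bit_ranges := by
  intro n _
  unfold Spec_get_bit_ranges
  by_cases h0 : n = 0
  · subst h0; decide
  · have halt : get_bit_ranges_alt n = pvRuns ((pvPyBin n).drop 2) none 0 := by
      have h := (pvB_runs ((pvPyBin n).drop 2) ((pvPyBin n).drop 2) 0 (by simp)).1 (Or.inl rfl)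
      simpa [get_bit_ranges_alt] using h
    rw [halt]
    by_cases hneg : n < 0
    · have hb : (pvPyBin n).drop 2 = 'b' :: pvNatBits n.natAbs := by
        simp [pvPyBin, hneg, h0]
      simp only [get_bit_ranges, hb]
      rw [PySem.List.enumerate_cons]
      simp only [List.foldl_cons]
      rw [show pvStepA ([], none) ((0 : Int), 'b') = ([], none) from by simp [pvStepA]]
      rw [show ((('b' :: pvNatBits n.natAbs).length : Nat) : Int)
          = ((0 : Int) + 1) + ((pvNatBits n.natAbs).length : Int) from by
        push_cast [List.length_cons]; ring]
      rw [pvA_runs (pvNatBits n.natAbs) ((0 : Int) + 1) none [] (pvNatBits_chars _)]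
      rw [show pvRuns ('b' :: pvNatBits n.natAbs) none 0
          = pvRuns (pvNatBits n.natAbs) none (0 + 1) from by simp [pvRuns]]
      simp
    · have hb : (pvPyBin n).drop 2 = pvNatBits n.natAbs := by
        simp [pvPyBin, hneg, h0]
      simp only [get_bit_ranges, hb]
      have h := pvA_runs (pvNatBits n.natAbs) 0 none [] (pvNatBits_chars _)
      simpa using h
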